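-- pv_equiv track=rewrite | github.com/Yuvv/CSES | introductory-problems/012-palindrome-reorder.py | solve
-- ===== SOURCE A (Python) =====
-- def solve(ss: str) -> str:
--     ch_set = set()
--     ch_list = list()
--     for c in ss:
--         if c not in ch_set:
--             ch_set.add(c)
--         else:
--             ch_list.append(c)
--             ch_set.remove(c)
--
--     ch_set_len = len(ch_set)
--     mid_ch = ''
--     if ch_set_len > 1:
--         return 'NO SOLUTION'
--     elif ch_set_len == 1:
--         mid_ch = list(ch_set)[0]
--
--     return ''.join(ch_list) + mid_ch + ''.join(ch_list[::-1])
-- ===== SOURCE B (Python) =====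
-- def solve(ss: str) -> str:
--     # Group the positions of each character.
--     pos = {}
--     for i, c in enumerate(ss):
--         pos.setdefault(c, []).append(i)
--     odd = [c for c, ps in pos.items() if len(ps) % 2 == 1]
--     if len(odd) > 1:
--         return 'NO SOLUTION'
--     mid = odd[0] if odd else ''
--     # Every second position of each character belongs to the half; merge them
--     # back into string order by sorting the indices.
--     sel = sorted(i for ps in pos.values() for i in ps[1::2])
--     half = ''.join(ss[i] for i in sel)
--     return half + mid + half[::-1]
-- ===== Notes on version B (the rewrite author's own statement) =====
-- stated objective: alternative
-- what changed: A runs one pass with a parity set, harvesting each pair's second occurrence into the half as it goes; B instead groups each character's positions into index lists, decides feasibility/middle from the list lengths, takes every second position (ps[1::2]) per character and sorts the merged indices back into string order to build the half.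
import Mathlib
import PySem

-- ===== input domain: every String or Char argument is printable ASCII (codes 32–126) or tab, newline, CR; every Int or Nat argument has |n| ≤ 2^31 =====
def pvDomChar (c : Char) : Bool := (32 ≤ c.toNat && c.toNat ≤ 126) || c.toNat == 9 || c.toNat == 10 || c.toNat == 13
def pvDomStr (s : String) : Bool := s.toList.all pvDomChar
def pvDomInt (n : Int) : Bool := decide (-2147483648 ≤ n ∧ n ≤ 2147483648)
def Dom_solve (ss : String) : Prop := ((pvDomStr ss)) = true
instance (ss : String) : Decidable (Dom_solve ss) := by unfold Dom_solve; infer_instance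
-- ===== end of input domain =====

-- B is an alternative algorithm: it groups each character's positions into index lists,
-- decides feasibility and the middle character from the list lengths, then takes every
-- second position per character (ps[1::2]) and sorts the merged indices to rebuild the half.

-- ===== PORT A =====
-- one loop step of A: parity set + list of every-second occurrences
def stepA (st : PySem.Set Char × List Char) (c : Char) : PySem.Set Char × List Char :=
  if !(PySem.Set.contains st.1 c) then (PySem.Set.add st.1 c, st.2)
  else (PySem.Set.discard st.1 c, st.2 ++ [c])
  -- ch_set.remove(c): c is a member in this branch, so no KeyError — discard is exact here

def solve (ss : String) : String :=
  let st := ss.toList.foldl stepA (PySem.Set.empty, [])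
  let chSetLen := PySem.Set.len st.1
  if chSetLen > 1 then "NO SOLUTION"
  else
    -- list(ch_set)[0]: the set has exactly one element in this branch, so the
    -- (unmodelled) hash iteration order cannot matter
    let midCh : String :=
      if chSetLen = 1 then
        match PySem.List.pyGet? (st.1 : List Char) 0 with
        | some c => String.ofList [c]
        | none => ""
      else ""
    -- ''.join over one-char strings is String.ofList; ch_list[::-1] via slice? (step -1 ≠ 0, so some)
    String.ofList st.2 ++ midCh ++ String.ofList ((PySem.List.slice? st.2 none none (-1)).getD [])

-- ===== PORT B =====
def solve_alt (ss : String) : String :=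
  let l := ss.toList
  -- pos.setdefault(c, []).append(i): append i to the list stored at c (default []) — Dict.modify is exact here
  let pos := (PySem.List.enumerate l 0).foldl
      (fun (d : PySem.Dict Char (List Int)) p => d.modify p.2 [] (· ++ [p.1])) PySem.Dict.empty
  let odd := (pos.items.filter (fun q => PySem.Int.mod (PySem.List.len q.2) 2 == 1)).map Prod.fst
  if odd.length > 1 then "NO SOLUTION"
  else
    let mid : String := match odd with | c :: _ => String.ofList [c] | [] => ""
    -- sorted(i for ps in pos.values() for i in ps[1::2]); step 2 ≠ 0, so slice? is some
    let sel := PySem.List.sorted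
      (pos.values.flatMap (fun ps => (PySem.List.slice? ps (some 1) none 2).getD []))
      (fun x => x) false
    -- ''.join(ss[i] for i in sel): every i in sel is an in-range index, so ss[i] never raises
    let half := String.ofList (sel.filterMap (fun i => PySem.List.pyGet? l i))
    half ++ mid ++ ((PySem.Str.slice? half none none (-1)).getD "")   -- half[::-1]

-- ===== PRECONDITION & SPEC =====
def Spec_solve (ss : String) (out : String) : Prop := out = solve_alt ss
instance (ss : String) (out : String) : Decidable (Spec_solve ss out) := by unfold Spec_solve; infer_instance

-- ===== CLAIM (what is proved, stated in full; the proofs are below) =====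
def Claim_equal_solve : Prop := ∀ (ss : String), Dom_solve ss → Spec_solve ss (solve ss)

-- ===== LEMMAS AND PROOFS =====

-- proof-only helpers: the positions of c in l; every second element (xs[1::2]);
-- the (index, char) pairs whose running occurrence count is even — exactly the half
def idxOf (l : List Char) (c : Char) : List Int :=
  ((PySem.List.enumerate l 0).filter (fun p => p.2 == c)).map (·.1)

def oddIdx {α : Type} : List α → List α
  | [] => []
  | [_] => []
  | _ :: b :: t => b :: oddIdx t

def evenPairs (l : List Char) : List (Int × Char) :=
  (PySem.List.enumerate l 0).filter (fun p => decide (¬ (2 ∣ (l.take p.1.toNat).count p.2)))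

theorem mod_two_beq (n : Nat) (r : Int) :
    (PySem.Int.mod (n : Int) 2 == r) = decide ((n : Int) % 2 = r) := by
  rw [PySem.Int.mod_eq_emod_of_pos (by norm_num)]
  exact beq_eq_decide _ _

theorem oddIdx_append {α : Type} (ys : List α) (a : α) :
    oddIdx (ys ++ [a]) = oddIdx ys ++ (if ys.length % 2 = 1 then [a] else []) := by
  induction ys using oddIdx.induct with
  | case1 => simp [oddIdx]
  | case2 x => simp [oddIdx]
  | case3 x b t ih =>
    simp only [List.cons_append, oddIdx, ih, List.length_cons]
    have : (t.length + 1 + 1) % 2 = t.length % 2 := by omega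
    simp only [this]

theorem range_filterMap_oddIdx {α : Type} (ps : List α) :
    (List.range (ps.length / 2)).filterMap (fun k => ps[2 * k + 1]?) = oddIdx ps := by
  induction ps using oddIdx.induct with
  | case1 => simp [oddIdx]
  | case2 x => simp [oddIdx]
  | case3 x b t ih =>
    have h2 : (x :: b :: t).length / 2 = t.length / 2 + 1 := by simp; omega
    rw [h2, List.range_succ_eq_map, List.filterMap_cons]
    simp only [List.filterMap_map]
    have : ∀ k, ((fun k => (x :: b :: t)[2 * k + 1]?) ∘ Nat.succ) k = t[2 * k + 1]? := by
      intro k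
      simp only [Function.comp]
      rw [show (2 * Nat.succ k + 1) = ((2*k+1) + 1) + 1 by omega]
      simp
    simp only [this]
    simp [oddIdx, ih]

theorem slice2 {α : Type} (ps : List α) :
    PySem.List.slice? ps (some 1) none 2 = some (oddIdx ps) := by
  cases ps with
  | nil => rfl
  | cons a t =>
    rw [← range_filterMap_oddIdx]
    simp only [PySem.List.slice?, PySem.List.sliceIndices]
    norm_num
    have hc : (if 0 < t.length then (((t.length : Int) + 2 - 1) / 2).toNat else 0) = (t.length + 1) / 2 := by
      rcases Nat.eq_zero_or_pos t.length with h|h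
      · simp [h]
      · rw [if_pos h]; omega
    rw [hc]
    have hf : ∀ x : Nat, (a :: t)[(1 + 2 * (x : Int)).toNat]? = t[2 * x]? := by
      intro x
      rw [show (1 + 2 * (x : Int)).toNat = 2 * x + 1 by omega]
      simp
    simp only [hf]

theorem pos_getD (l : List Char) (c : Char) :
    ((PySem.List.enumerate l 0).foldl
      (fun (d : PySem.Dict Char (List Int)) p => d.modify p.2 [] (· ++ [p.1]))
      PySem.Dict.empty).getD c [] = idxOf l c := by
  rw [show (PySem.List.enumerate l 0).foldl
      (fun (d : PySem.Dict Char (List Int)) p => d.modify p.2 [] (· ++ [p.1])) PySem.Dict.empty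
    = ((PySem.List.enumerate l 0).map (fun p => (p.2, p.1))).foldl
      (fun (d : PySem.Dict Char (List Int)) q => d.modify q.1 [] (· ++ [q.2])) PySem.Dict.empty
    from by rw [List.foldl_map]]
  rw [PySem.Dict.getD_foldl_modify_append]
  simp [idxOf, List.filter_map, List.map_map, Function.comp_def]

theorem pos_keys (l : List Char) :
    ((PySem.List.enumerate l 0).foldl
      (fun (d : PySem.Dict Char (List Int)) p => d.modify p.2 [] (· ++ [p.1]))
      PySem.Dict.empty).keys = PySem.Set.ofList l := by
  rw [PySem.Dict.keys_foldl_modify_key]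
  simp [PySem.List.map_snd_enumerate, PySem.Set.update, PySem.Set.ofList_eq_foldl,
    PySem.Dict.keys_empty]

theorem pos_nodup_keys (l : List Char) :
    ((PySem.List.enumerate l 0).foldl
      (fun (d : PySem.Dict Char (List Int)) p => d.modify p.2 [] (· ++ [p.1]))
      PySem.Dict.empty).keys.Nodup := by
  rw [pos_keys]; exact PySem.Set.nodup_ofList l

theorem pos_items (l : List Char) :
    ((PySem.List.enumerate l 0).foldl
      (fun (d : PySem.Dict Char (List Int)) p => d.modify p.2 [] (· ++ [p.1]))
      PySem.Dict.empty).items = (PySem.Set.ofList l).map (fun c => (c, idxOf l c)) := by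
  rw [PySem.Dict.items_eq_map_keys _ (pos_nodup_keys l) [], pos_keys]
  exact List.map_congr_left (fun c _ => by rw [pos_getD])

theorem pos_values (l : List Char) :
    ((PySem.List.enumerate l 0).foldl
      (fun (d : PySem.Dict Char (List Int)) p => d.modify p.2 [] (· ++ [p.1]))
      PySem.Dict.empty).values = (PySem.Set.ofList l).map (idxOf l) := by
  rw [PySem.Dict.values_eq_map_keys _ (pos_nodup_keys l) [], pos_keys]
  exact List.map_congr_left (fun c _ => by rw [pos_getD])

theorem idxOf_length (l : List Char) (c : Char) : (idxOf l c).length = l.count c := by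
  simp only [idxOf, List.length_map, ← List.countP_eq_length_filter]
  rw [List.count_eq_countP]
  conv_rhs => rw [← PySem.List.map_snd_enumerate l 0]
  rw [List.countP_map]
  simp [Function.comp_def]

theorem idxOf_append (l : List Char) (x c : Char) :
    idxOf (l ++ [x]) c = idxOf l c ++ (if x == c then [(l.length : Int)] else []) := by
  simp only [idxOf, PySem.List.enumerate_append, List.filter_append]
  rw [List.map_append]
  congr 1
  simp [PySem.List.enumerate]
  split <;> simp_all

theorem evenPairs_append (l : List Char) (x : Char) :
    evenPairs (l ++ [x]) =
      evenPairs l ++ (if ¬ (2 ∣ l.count x) then [((l.length : Int), x)] else []) := by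
  simp only [evenPairs, PySem.List.enumerate_append, List.filter_append]
  congr 1
  · apply List.filter_congr
    intro p hp
    obtain ⟨k, hk, rfl⟩ := (PySem.List.mem_enumerate_iff _ _ _).mp hp
    have h0 : ((0 + (k : Int)).toNat) = k := by omega
    rw [h0, List.take_append_of_le_length (by omega)]
  · simp only [PySem.List.enumerate, List.filter_cons, List.filter_nil]
    have h0 : ((0 + (l.length : Int)).toNat) = l.length := by omega
    rw [h0, List.take_append_of_le_length (le_refl _), List.take_length]
    by_cases h : 2 ∣ l.count x <;> simp [h]

theorem evenPairs_mem (l : List Char) {p : Int × Char} (hp : p ∈ evenPairs l) :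
    ∃ (k : Nat) (h : k < l.length), p = ((k : Int), l[k]) := by
  have := List.mem_of_mem_filter hp
  simpa using (PySem.List.mem_enumerate_iff _ _ _).mp this

theorem evenPairs_pairwise (l : List Char) :
    ((evenPairs l).map (·.1)).Pairwise (· < ·) := by
  have h1 : (evenPairs l).Pairwise (fun p q => p.1 < q.1) :=
    (PySem.List.pairwise_lt_enumerate l 0).sublist List.filter_sublist
  exact h1.map (fun x : Int × Char => x.1) (fun a b h => h)

theorem oddIdx_idxOf (l : List Char) (c : Char) :
    oddIdx (idxOf l c) = ((evenPairs l).filter (fun p => p.2 == c)).map (·.1) := by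
  induction l using List.reverseRecOn with
  | nil => simp [idxOf, evenPairs, PySem.List.enumerate, oddIdx]
  | append_singleton l x ih =>
    rw [idxOf_append, evenPairs_append, List.filter_append, List.map_append, ← ih]
    by_cases hxc : x == c
    · have hx : x = c := by simpa using hxc
      subst hx
      rw [if_pos hxc, oddIdx_append, idxOf_length]
      by_cases hd : 2 ∣ l.count x
      · have : ¬ (l.count x % 2 = 1) := by omega
        simp [hd, this]
      · have : l.count x % 2 = 1 := by omega
        simp [hd, this]
    · by_cases hd : 2 ∣ l.count x <;> simp [hxc, hd]

-- general merge permutation over a dedup set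

theorem flat_perm_gen (E : List (Int × Char)) (s : List Char) (hnd : s.Nodup) :
    (s.flatMap (fun c => (E.filter (fun p => p.2 == c)).map (·.1))).Perm
      ((E.filter (fun p => decide (p.2 ∈ s))).map (·.1)) := by
  induction s with
  | nil => simp
  | cons c s' ih =>
    have hnd' : s'.Nodup := hnd.of_cons
    have hcs : c ∉ s' := by simp at hnd; exact hnd.1
    simp only [List.flatMap_cons]
    have h1 : (E.filter (fun p => decide (p.2 ∈ c :: s'))).Perm
        (E.filter (fun p => p.2 == c) ++ E.filter (fun p => decide (p.2 ∈ s'))) := by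
      have hsplit := List.filter_append_perm (fun p => p.2 == c)
        (E.filter (fun p => decide (p.2 ∈ c :: s')))
      rw [List.filter_filter, List.filter_filter] at hsplit
      have e1 : ∀ p : Int × Char, ((p.2 == c) && decide (p.2 ∈ c :: s')) = (p.2 == c) := by
        intro p; by_cases h : p.2 = c <;> simp [h]
      have e2 : ∀ p : Int × Char, ((!(p.2 == c)) && decide (p.2 ∈ c :: s')) = decide (p.2 ∈ s') := by
        intro p; by_cases h : p.2 = c <;> simp [h, hcs]
      rw [List.filter_congr (fun p _ => e1 p), List.filter_congr (fun p _ => e2 p)] at hsplit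
      exact hsplit.symm
    refine ((ih hnd').append_left _).trans ?_
    rw [← List.map_append]
    exact (h1.map _).symm

theorem flat_perm (l : List Char) :
    ((PySem.Set.ofList l).flatMap
        (fun c => ((evenPairs l).filter (fun p => p.2 == c)).map (·.1))).Perm
      ((evenPairs l).map (·.1)) := by
  have h := flat_perm_gen (evenPairs l) (PySem.Set.ofList l) (PySem.Set.nodup_ofList l)
  have hfull : (evenPairs l).filter (fun p => decide (p.2 ∈ PySem.Set.ofList l)) = evenPairs l := by
    apply List.filter_eq_self.mpr
    intro p hp
    obtain ⟨k, hk, rfl⟩ := evenPairs_mem l hp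
    simp [PySem.Set.mem_ofList]
  rwa [hfull] at h

theorem fold_inv (l : List Char) :
    (l.foldl stepA (PySem.Set.empty, [])).1.Nodup ∧
    (∀ c, c ∈ (l.foldl stepA (PySem.Set.empty, [])).1 ↔ ¬ 2 ∣ l.count c) ∧
    (l.foldl stepA (PySem.Set.empty, [])).2 = (evenPairs l).map (·.2) := by
  induction l using List.reverseRecOn with
  | nil =>
    refine ⟨List.nodup_nil, ?_, by simp [evenPairs, PySem.List.enumerate]⟩
    intro c; simp [PySem.Set.empty]
  | append_singleton l x ih =>
    obtain ⟨hnd, hmem, hacc⟩ := ih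
    simp only [List.foldl_append, List.foldl_cons, List.foldl_nil]
    set sA := l.foldl stepA (PySem.Set.empty, []) with hsA
    have hx := hmem x
    refine ⟨?_, ?_, ?_⟩
    · by_cases h : x ∈ sA.1
      · simpa [stepA, h] using PySem.Set.nodup_discard sA.1 x hnd
      · simpa [stepA, h] using PySem.Set.nodup_add sA.1 x hnd
    · intro c
      by_cases h : x ∈ sA.1
      · have hodd : ¬ 2 ∣ l.count x := hx.mp h
        by_cases hcx : c = x
        · subst hcx
          simp [stepA, h, PySem.Set.mem_discard, List.count_append]
          omega
        · simp [stepA, h, PySem.Set.mem_discard, List.count_append, hcx, hmem c, Ne.symm hcx]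
      · have heven : 2 ∣ l.count x := by by_contra hc; exact h (hx.mpr hc)
        by_cases hcx : c = x
        · subst hcx
          simp [stepA, h, List.count_append]
          omega
        · simp [stepA, h, List.count_append, hcx, hmem c, Ne.symm hcx]
    · rw [evenPairs_append, List.map_append]
      by_cases h : x ∈ sA.1
      · have hodd : ¬ 2 ∣ l.count x := hx.mp h
        simp [stepA, h, hacc, hodd]
      · have heven : 2 ∣ l.count x := by by_contra hc; exact h (hx.mpr hc)
        simp [stepA, h, hacc, heven]

theorem odd_eq (l : List Char) :
    ((((PySem.List.enumerate l 0).foldl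
        (fun (d : PySem.Dict Char (List Int)) p => d.modify p.2 [] (· ++ [p.1]))
        PySem.Dict.empty).items.filter
          (fun q => PySem.Int.mod (PySem.List.len q.2) 2 == 1)).map Prod.fst)
      = (PySem.Set.ofList l).filter (fun c => PySem.Int.mod ((l.count c : Nat) : Int) 2 == 1) := by
  rw [pos_items, List.filter_map, List.map_map]
  have h : ∀ c, ((fun q : Char × List Int => PySem.Int.mod (PySem.List.len q.2) 2 == 1) ∘
      (fun c => (c, idxOf l c))) c = (PySem.Int.mod ((l.count c : Nat) : Int) 2 == 1) := by
    intro c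
    simp only [Function.comp]
    rw [PySem.List.len_eq, idxOf_length]
  rw [List.filter_congr (fun c _ => h c)]
  simp [Function.comp_def]

theorem sel_chars (l : List Char) :
    (((evenPairs l).map (·.1)).filterMap (fun i => PySem.List.pyGet? l i))
      = (evenPairs l).map (·.2) := by
  rw [List.filterMap_map]
  have h : ∀ p ∈ evenPairs l,
      ((fun i => PySem.List.pyGet? l i) ∘ (·.1)) p = some p.2 := by
    intro p hp
    obtain ⟨k, hk, rfl⟩ := evenPairs_mem l hp
    simp [hk]
  rw [List.filterMap_congr h]
  simp

theorem solve_eq_alt (ss : String) : solve ss = solve_alt ss := by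
  obtain ⟨hnd, hmem, hacc⟩ := fold_inv ss.toList
  simp only [solve, solve_alt]
  rw [odd_eq]
  set l := ss.toList with hl
  set sA := l.foldl stepA (PySem.Set.empty, []) with hsA
  set odd := (PySem.Set.ofList l).filter (fun c => PySem.Int.mod ((l.count c : Nat) : Int) 2 == 1)
    with hodd
  -- sel = the half's indices
  have hsel : PySem.List.sorted
      ((((PySem.List.enumerate l 0).foldl
        (fun (d : PySem.Dict Char (List Int)) p => d.modify p.2 [] (· ++ [p.1]))
        PySem.Dict.empty).values).flatMap (fun ps => (PySem.List.slice? ps (some 1) none 2).getD []))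
      (fun x => x) false = (evenPairs l).map (·.1) := by
    rw [pos_values]
    have hfm : ((PySem.Set.ofList l).map (idxOf l)).flatMap
        (fun ps => (PySem.List.slice? ps (some 1) none 2).getD [])
        = (PySem.Set.ofList l).flatMap
            (fun c => ((evenPairs l).filter (fun p => p.2 == c)).map (·.1)) := by
      rw [List.flatMap_map]
      apply List.flatMap_congr
      intro c hc
      rw [slice2, Option.getD_some, oddIdx_idxOf]
    rw [hfm]
    exact PySem.List.sorted_eq_of_perm_of_pairwise_lt _ _ (fun x => x) (flat_perm l).symm
      (evenPairs_pairwise l)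
  have hhalf : (((evenPairs l).map (·.1)).filterMap (fun i => PySem.List.pyGet? l i))
      = sA.2 := by rw [sel_chars, hacc]
  -- odd ~ A's set
  have hndo : odd.Nodup := List.Nodup.filter _ (PySem.Set.nodup_ofList l)
  have hmemo : ∀ c, c ∈ odd ↔ c ∈ sA.1 := by
    intro c
    rw [hodd, List.mem_filter, PySem.Set.mem_ofList, hmem c, mod_two_beq, decide_eq_true_eq]
    constructor
    · rintro ⟨_, h⟩; omega
    · intro h
      have hc0 : l.count c ≠ 0 := by omega
      exact ⟨List.count_pos_iff.mp (Nat.pos_of_ne_zero hc0), by omega⟩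
  have hperm : odd.Perm sA.1 := (List.perm_ext_iff_of_nodup hndo hnd).mpr hmemo
  have hrevA : ∀ (xs : List Char), (PySem.List.slice? xs none none (-1)).getD [] = xs.reverse := by
    intro xs; rw [PySem.List.slice?_none_none_neg_one]; rfl
  have hrevB : ∀ (xs : List Char), (PySem.Str.slice? (String.ofList xs) none none (-1)).getD ""
      = String.ofList xs.reverse := by
    intro xs
    rw [PySem.Str.slice?_none_none_neg_one]
    simp
  rcases hodd' : odd with _ | ⟨a, _ | ⟨b, t⟩⟩
  · have hperm' := hperm; rw [hodd'] at hperm'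
    have hs : sA.1 = [] := hperm'.nil_eq.symm
    simp [hs, PySem.Set.len, hacc, hsel, hhalf, hrevA, hrevB]
  · have hperm' := hperm; rw [hodd'] at hperm'
    have hs : sA.1 = [a] := List.perm_singleton.mp hperm'.symm
    simp [hs, PySem.Set.len, hacc, hsel, hhalf, hrevA, hrevB]
  · have hlen2 : 2 ≤ sA.1.length := by
      have hle := hperm.length_eq
      rw [hodd'] at hle
      simp at hle
      omega
    have h1 : PySem.Set.len sA.1 > 1 := by
      simp [PySem.Set.len]
      omega
    rw [if_pos h1, if_pos (by simp)]

-- ===== VERDICT (by name: the statement is the Claim_ definition above) =====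
theorem solve_spec : Claim_equal_solve := by
  intro ss _
  unfold Spec_solve
  exact solve_eq_alt ss
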